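-- pv_equiv track=rewrite | github.com/DominikUch/xiangqi | game_logic.py | count_between
-- ===== SOURCE A (Python) =====
-- def count_between(pieces, src, dst):
--     x1, y1 = src
--     x2, y2 = dst
--     count = 0
--     if x1 == x2:
--         step = 1 if y2 > y1 else -1
--         for y in range(y1 + step, y2, step):
--             if (x1, y) in pieces:
--                 count += 1
--     elif y1 == y2:
--         step = 1 if x2 > x1 else -1
--         for x in range(x1 + step, x2, step):
--             if (x, y1) in pieces:
--                 count += 1
--     return count
-- ===== SOURCE B (Python) =====
-- def count_between(pieces, src, dst):
--     x1, y1 = src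
--     x2, y2 = dst
--     cells = set(pieces)
--     if x1 == x2:
--         lo, hi = min(y1, y2), max(y1, y2)
--         return sum(1 for (px, py) in cells if px == x1 and lo < py < hi)
--     if y1 == y2:
--         lo, hi = min(x1, x2), max(x1, x2)
--         return sum(1 for (px, py) in cells if py == y1 and lo < px < hi)
--     return 0
-- ===== Notes on version B (the rewrite author's own statement) =====
-- stated objective: faster
-- what changed: Instead of walking every cell of the segment and scanning the pieces list for each, B iterates once over the deduplicated pieces and tests each position geometrically (same axis, coordinate strictly between the endpoints).
import Mathlib
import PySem

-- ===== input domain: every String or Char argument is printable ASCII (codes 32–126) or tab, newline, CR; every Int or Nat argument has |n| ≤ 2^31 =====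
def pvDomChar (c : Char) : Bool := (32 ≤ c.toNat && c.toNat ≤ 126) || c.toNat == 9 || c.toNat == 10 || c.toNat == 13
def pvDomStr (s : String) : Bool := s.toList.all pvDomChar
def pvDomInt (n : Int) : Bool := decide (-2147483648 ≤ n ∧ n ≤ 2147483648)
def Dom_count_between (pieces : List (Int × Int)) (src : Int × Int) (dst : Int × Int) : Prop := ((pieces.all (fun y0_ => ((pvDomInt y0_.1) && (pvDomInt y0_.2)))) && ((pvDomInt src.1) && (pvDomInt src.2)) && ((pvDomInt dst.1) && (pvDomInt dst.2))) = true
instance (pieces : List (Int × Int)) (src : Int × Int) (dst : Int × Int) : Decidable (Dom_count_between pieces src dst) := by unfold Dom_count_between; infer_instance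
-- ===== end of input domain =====

-- B replaces A's cell-by-cell walk of the segment (each with a scan of `pieces`)
-- by a single pass over the deduplicated pieces with a geometric betweenness test.

-- ===== PORT A =====
def count_between (pieces : List (Int × Int)) (src : Int × Int) (dst : Int × Int) : Int :=
  let x1 := src.1; let y1 := src.2
  let x2 := dst.1; let y2 := dst.2
  if x1 = x2 then
    let step : Int := if y2 > y1 then 1 else -1
    (PySem.List.pyRange (y1 + step) y2 step).foldl
      (fun count y => if (x1, y) ∈ pieces then count + 1 else count) 0
  else if y1 = y2 then
    let step : Int := if x2 > x1 then 1 else -1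
    (PySem.List.pyRange (x1 + step) x2 step).foldl
      (fun count x => if (x, y1) ∈ pieces then count + 1 else count) 0
  else 0

-- ===== PORT B =====
def count_between_alt (pieces : List (Int × Int)) (src : Int × Int) (dst : Int × Int) : Int :=
  let x1 := src.1; let y1 := src.2
  let x2 := dst.1; let y2 := dst.2
  let cells := PySem.Set.ofList pieces
  if x1 = x2 then
    ((cells.countP (fun p => decide (p.1 = x1 ∧ min y1 y2 < p.2 ∧ p.2 < max y1 y2)) : Nat) : Int)
  else if y1 = y2 then
    ((cells.countP (fun p => decide (p.2 = y1 ∧ min x1 x2 < p.1 ∧ p.1 < max x1 x2)) : Nat) : Int)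
  else 0

-- ===== PRECONDITION & SPEC =====
def Spec_count_between (pieces : List (Int × Int)) (src : Int × Int) (dst : Int × Int) (out : Int) : Prop := out = count_between_alt pieces src dst
instance (pieces : List (Int × Int)) (src : Int × Int) (dst : Int × Int) (out : Int) : Decidable (Spec_count_between pieces src dst out) := by unfold Spec_count_between; infer_instance

-- ===== CLAIM (what is proved, stated in full; the proofs are below) =====
def Claim_equal_count_between : Prop := ∀ (pieces : List (Int × Int)) (src : Int × Int) (dst : Int × Int), Dom_count_between pieces src dst → Spec_count_between pieces src dst (count_between pieces src dst)

-- ===== LEMMAS AND PROOFS =====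

-- Counting common elements of two duplicate-free lists is symmetric
-- (stated via arbitrary Boolean membership predicates to be instance-robust).
lemma countP_mem_comm {α : Type} [DecidableEq α] (l1 l2 : List α)
    (h1 : l1.Nodup) (h2 : l2.Nodup) (p q : α → Bool)
    (hp : ∀ a, p a = true ↔ a ∈ l2) (hq : ∀ a, q a = true ↔ a ∈ l1) :
    l1.countP p = l2.countP q := by
  rw [List.countP_eq_length_filter, List.countP_eq_length_filter,
      ← List.toFinset_card_of_nodup (h1.filter p),
      ← List.toFinset_card_of_nodup (h2.filter q)]
  congr 1
  ext a
  simp only [List.mem_toFinset, List.mem_filter, hp, hq]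
  tauto

lemma nodup_pyRange_neg_one (a b : Int) : (PySem.List.pyRange a b (-1)).Nodup := by
  rw [PySem.List.pyRange_neg_one_eq_reverse, List.nodup_reverse]
  exact PySem.List.nodup_pyRange_one _ _

lemma nodup_pyRange_step (u v : Int) :
    (PySem.List.pyRange (u + if v > u then 1 else -1) v (if v > u then 1 else -1)).Nodup := by
  by_cases h : v > u
  · rw [if_pos h]; exact PySem.List.nodup_pyRange_one _ _
  · rw [if_neg h]; exact nodup_pyRange_neg_one _ _

lemma mem_pyRange_step (u v x : Int) :
    x ∈ PySem.List.pyRange (u + if v > u then 1 else -1) v (if v > u then 1 else -1)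
      ↔ min u v < x ∧ x < max u v := by
  by_cases h : v > u
  · simp only [if_pos h, PySem.List.mem_pyRange_one]; omega
  · simp only [if_neg h, PySem.List.mem_pyRange_neg_one]; omega

-- A's segment walk with a membership test equals B's single pass over the deduped
-- pieces, for any injective cell map f, duplicate-free coordinate list r, and
-- predicate Q characterising "is an interior cell of the segment".
lemma walk_eq_scan (pieces : List (Int × Int)) (f : Int → Int × Int)
    (hf : Function.Injective f) (r : List Int) (hr : r.Nodup)
    (Q : Int × Int → Prop) [DecidablePred Q]
    (hQ : ∀ p, Q p ↔ ∃ y ∈ r, f y = p) :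
    r.foldl (fun count y => if f y ∈ pieces then count + 1 else count) (0 : Int)
      = ((PySem.Set.ofList pieces).countP (fun p => decide (Q p)) : Int) := by
  rw [PySem.List.foldl_ite_add_one, zero_add]
  congr 1
  calc r.countP (fun y => decide (f y ∈ pieces))
      = (r.map f).countP (fun p => decide (p ∈ pieces)) := by
        rw [List.countP_map]
        apply List.countP_congr
        intro y _
        simp
    _ = (PySem.Set.ofList pieces).countP (fun p => decide (Q p)) := by
        apply countP_mem_comm (r.map f) (PySem.Set.ofList pieces)
          (hr.map hf) (PySem.Set.nodup_ofList pieces)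
        · intro a; simp [PySem.Set.mem_ofList]
        · intro a; simp [hQ a]

-- ===== VERDICT (by name: the statement is the Claim_ definition above) =====
theorem count_between_spec : Claim_equal_count_between := by
  intro pieces src dst _
  unfold Spec_count_between count_between count_between_alt
  obtain ⟨x1, y1⟩ := src
  obtain ⟨x2, y2⟩ := dst
  simp only
  by_cases hx : x1 = x2
  · rw [if_pos hx, if_pos hx]
    exact walk_eq_scan pieces (fun y => (x1, y)) (fun a b h => by simpa using h)
      _ (nodup_pyRange_step y1 y2)
      _ (fun p => by
          constructor
          · rintro ⟨h1, h2, h3⟩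
            exact ⟨p.2, (mem_pyRange_step y1 y2 p.2).2 ⟨h2, h3⟩, by simp [h1.symm]⟩
          · rintro ⟨y, hy, rfl⟩
            exact ⟨rfl, (mem_pyRange_step y1 y2 y).1 hy⟩)
  · rw [if_neg hx, if_neg hx]
    by_cases hy : y1 = y2
    · rw [if_pos hy, if_pos hy]
      exact walk_eq_scan pieces (fun x => (x, y1)) (fun a b h => by simpa using h)
        _ (nodup_pyRange_step x1 x2)
        _ (fun p => by
            constructor
            · rintro ⟨h1, h2, h3⟩
              exact ⟨p.1, (mem_pyRange_step x1 x2 p.1).2 ⟨h2, h3⟩, by simp [h1.symm]⟩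
            · rintro ⟨x, hxm, rfl⟩
              exact ⟨rfl, (mem_pyRange_step x1 x2 x).1 hxm⟩)
    · rw [if_neg hy, if_neg hy]
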